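-- pv_equiv track=rewrite | github.com/RamsesXVII/infovis2.0 | oddi/random_tringulation_generator.py | getIsomorphicCount
-- ===== SOURCE A (Python) =====
-- def getIsomorphicCount(randomTriangulation,polygonNodes):
--     nodeToCount=dict()
--     for triangle in randomTriangulation:
--         for node in triangle:
--             if node in nodeToCount:
--                 nodeToCount[node]+=1
--             else:
--                 nodeToCount[node]=2
--
--     degreeSequence=list()
--     for node in sorted(nodeToCount.keys()):
--         degreeSequence.append(nodeToCount[node])
--
--     degreeSequenceSet=set()
--     degreeSequenceSet.add(str(degreeSequence))
--
--     for i in range (1,polygonNodes):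
--         degreeSequenceSet.add(str(shiftRight(degreeSequence,i)))
--
--     eqRotations=len(degreeSequenceSet)
--     mirroredDegree=str(degreeSequence[::-1])
--
--     if mirroredDegree not in degreeSequenceSet:
--         eqRotations=eqRotations*2
--     return eqRotations
--
-- def shiftRight(listToRotate,n):
--     return listToRotate[-n:]+listToRotate[:-n]
-- ===== SOURCE B (Python) =====
-- def getIsomorphicCount(randomTriangulation, polygonNodes):
--     degree = {}
--     for triangle in randomTriangulation:
--         for node in triangle:
--             degree[node] = degree.get(node, 1) + 1
--     seq = [degree[node] for node in sorted(degree)]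
--     n = len(seq)
--     if n == 0:
--         return 1
--     # smallest left-rotation period of seq: two rotations coincide iff their offsets agree mod p
--     p = next((i for i in range(1, n) if seq[i:] + seq[:i] == seq), n)
--     # offsets (mod p) of the rotations produced by right-shifting 0..polygonNodes-1 places;
--     # a right shift by i rotates left by n-i places, and shifts of n or more places wrap
--     offsets = {0} | {(n - i) % p for i in range(1, min(polygonNodes, n))}
--     rev = seq[::-1]
--     mirrored = any(seq[i:] + seq[:i] == rev for i in offsets)
--     return len(offsets) if mirrored else 2 * len(offsets)
-- ===== Notes on version B (the rewrite author's own statement) =====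
-- stated objective: faster
-- what changed: Instead of materialising every shifted copy of the degree sequence as a string in a set and taking the set's size, B finds the sequence's smallest rotation period and counts the rotations reached by the right shifts as a set of small residue offsets modulo that period, deciding the mirror test by rotating only at those few offsets.
import Mathlib
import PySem

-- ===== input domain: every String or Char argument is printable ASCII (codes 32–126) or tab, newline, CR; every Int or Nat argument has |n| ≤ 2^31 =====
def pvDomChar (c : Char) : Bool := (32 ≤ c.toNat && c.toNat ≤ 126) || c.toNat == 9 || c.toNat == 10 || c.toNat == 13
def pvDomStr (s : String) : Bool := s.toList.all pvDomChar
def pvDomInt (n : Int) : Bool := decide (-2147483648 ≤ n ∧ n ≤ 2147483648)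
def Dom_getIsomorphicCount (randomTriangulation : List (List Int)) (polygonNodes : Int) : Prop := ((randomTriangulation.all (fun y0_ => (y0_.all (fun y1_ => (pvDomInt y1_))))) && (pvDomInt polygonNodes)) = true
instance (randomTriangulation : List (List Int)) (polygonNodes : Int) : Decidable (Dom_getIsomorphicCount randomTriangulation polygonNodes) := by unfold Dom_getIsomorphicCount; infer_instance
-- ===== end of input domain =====

-- B counts the rotations reached by the right shifts via residue arithmetic modulo the
-- sequence's smallest rotation period, instead of materialising every shifted copy as a
-- string in a set (objective: faster, independent of polygonNodes after the period search).

-- ===== PORT A =====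

-- Hand port of Python's str() on a list of ints ("[a, b, c]"); exact for int lists.
def pvJoinComma : List (List Char) → List Char
  | [] => []
  | [x] => x
  | x :: y :: xs => x ++ ',' :: ' ' :: pvJoinComma (y :: xs)

def pvStrList (xs : List Int) : String :=
  String.ofList ('[' :: (pvJoinComma (xs.map PySem.Int.toChars) ++ [']']))

def shiftRight (listToRotate : List Int) (n : Int) : List Int :=
  PySem.List.slice listToRotate (some (-n)) none ++ PySem.List.slice listToRotate none (some (-n))

-- loop 1 and loop 2 of A: the node→degree dict, then the degree sequence over sorted keys
def pvDegreeSequenceA (randomTriangulation : List (List Int)) : List Int :=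
  let nodeToCount := randomTriangulation.foldl
    (fun d triangle => triangle.foldl
      (fun d node => if d.contains node then d.modify node 0 (· + 1) else d.insert node 2) d)
    (PySem.Dict.mk [])
  (PySem.List.sorted nodeToCount.keys (fun k => k) false).foldl
    (fun acc node => acc ++ [nodeToCount.getD node 0]) []

-- the set of stringified shifts (A's degreeSequenceSet after its loop)
def pvSetA (degreeSequence : List Int) (polygonNodes : Int) : PySem.Set String :=
  (PySem.List.pyRange 1 polygonNodes 1).foldl
    (fun s i => PySem.Set.add s (pvStrList (shiftRight degreeSequence i)))
    (PySem.Set.add PySem.Set.empty (pvStrList degreeSequence))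

def pvTailA (degreeSequence : List Int) (polygonNodes : Int) : Int :=
  let s := pvSetA degreeSequence polygonNodes
  let eqRotations : Int := PySem.Set.len s
  let mirroredDegree := pvStrList ((PySem.List.slice? degreeSequence none none (-1)).getD [])
  if !(PySem.Set.contains s mirroredDegree) then eqRotations * 2 else eqRotations

def getIsomorphicCount (randomTriangulation : List (List Int)) (polygonNodes : Int) : Int :=
  pvTailA (pvDegreeSequenceA randomTriangulation) polygonNodes

-- ===== PORT B =====

def pvDegreeSequenceB (randomTriangulation : List (List Int)) : List Int :=
  let counts := randomTriangulation.foldl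
    (fun d triangle => triangle.foldl
      (fun d node => d.insert node (d.getD node 1 + 1)) d)
    (PySem.Dict.mk [])
  (PySem.List.sorted counts.keys (fun k => k) false).map (fun k => counts.getD k 0)

-- seq[i:] + seq[:i]
def pvRot (seq : List Int) (i : Int) : List Int :=
  PySem.List.slice seq (some i) none ++ PySem.List.slice seq none (some i)

def pvTailB (seq : List Int) (pn : Int) : Int :=
  if seq.isEmpty then 1 else
    let n : Int := (seq.length : Int)
    let p := ((PySem.List.pyRange 1 n 1).find? (fun i => pvRot seq i == seq)).getD n
    let offsets := PySem.Set.union (PySem.Set.ofList [0])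
      (PySem.Set.ofList ((PySem.List.pyRange 1 (min pn n) 1).map
        (fun i => PySem.Int.mod (n - i) p)))
    let rev := seq.reverse
    let mirrored := offsets.any (fun i => pvRot seq i == rev)
    if mirrored then PySem.Set.len offsets else 2 * PySem.Set.len offsets

def getIsomorphicCount_alt (randomTriangulation : List (List Int)) (polygonNodes : Int) : Int :=
  pvTailB (pvDegreeSequenceB randomTriangulation) polygonNodes

-- ===== PRECONDITION & SPEC =====  (A is total: no Pre_)
def Spec_getIsomorphicCount (randomTriangulation : List (List Int)) (polygonNodes : Int) (out : Int) : Prop := out = getIsomorphicCount_alt randomTriangulation polygonNodes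
instance (randomTriangulation : List (List Int)) (polygonNodes : Int) (out : Int) : Decidable (Spec_getIsomorphicCount randomTriangulation polygonNodes out) := by unfold Spec_getIsomorphicCount; infer_instance

-- ===== CLAIM (what is proved, stated in full; the proofs are below) =====
def Claim_equal_getIsomorphicCount : Prop := ∀ (randomTriangulation : List (List Int)) (polygonNodes : Int), Dom_getIsomorphicCount randomTriangulation polygonNodes → Spec_getIsomorphicCount randomTriangulation polygonNodes (getIsomorphicCount randomTriangulation polygonNodes)

-- ===== LEMMAS AND PROOFS =====

-- ---------- decimal strings: Nat.toDigits via a structural recursion ----------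

def pvNatChars (n : ℕ) : List Char :=
  if n < 10 then [Nat.digitChar n] else pvNatChars (n / 10) ++ [Nat.digitChar (n % 10)]
  termination_by n
  decreasing_by exact Nat.div_lt_self (by omega) (by omega)

lemma pvToDigitsCore_eq : ∀ (f n : ℕ) (ds : List Char), 0 < f → n < 10 ^ f →
    Nat.toDigitsCore 10 f n ds = pvNatChars n ++ ds := by
  intro f
  induction f with
  | zero => omega
  | succ f ih =>
    intro n ds _ hlt
    by_cases h : n / 10 = 0
    · have hn : n < 10 := by omega
      rw [Nat.toDigitsCore, pvNatChars, if_pos h, if_pos hn, Nat.mod_eq_of_lt hn]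
      rfl
    · have hge : ¬ n < 10 := by omega
      have hf : 0 < f := by
        rcases Nat.eq_zero_or_pos f with rfl | hf0
        · exfalso
          have h10 : (10:ℕ) ^ (0 + 1) = 10 := by norm_num
          rw [h10] at hlt
          omega
        · exact hf0
      have hlt' : n / 10 < 10 ^ f := by
        rw [Nat.div_lt_iff_lt_mul (by omega)]
        calc n < 10 ^ (f + 1) := hlt
        _ = 10 ^ f * 10 := by ring
      simp only [Nat.toDigitsCore, h, if_false]
      rw [pvNatChars]
      rw [ih (n / 10) _ hf hlt']
      simp [hge, List.append_assoc]

lemma pvToDigits_eq (n : ℕ) : Nat.toDigits 10 n = pvNatChars n := by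
  have h1 : n < 10 ^ (n + 1) := by
    calc n < 10 ^ n := Nat.lt_pow_self (by omega)
    _ ≤ 10 ^ (n + 1) := Nat.pow_le_pow_right (by omega) (by omega)
  rw [Nat.toDigits, pvToDigitsCore_eq (n + 1) n [] (by omega) h1, List.append_nil]

lemma pvDigitChar_toNat (k : ℕ) (hk : k < 10) : (Nat.digitChar k).toNat = 48 + k := by
  interval_cases k <;> rfl

lemma pvNatChars_ne_nil (n : ℕ) : pvNatChars n ≠ [] := by
  rw [pvNatChars]
  split <;> simp

lemma pvNatChars_digits (n : ℕ) : ∀ c ∈ pvNatChars n, 48 ≤ c.toNat ∧ c.toNat ≤ 57 := by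
  induction n using Nat.strong_induction_on with
  | _ n ih =>
    rw [pvNatChars]
    split
    · next h =>
      intro c hc
      simp at hc
      subst hc
      have := pvDigitChar_toNat n (by omega)
      omega
    · next h =>
      intro c hc
      rcases List.mem_append.mp hc with h1 | h2
      · exact ih (n / 10) (Nat.div_lt_self (by omega) (by omega)) c h1
      · simp at h2
        subst h2
        have := pvDigitChar_toNat (n % 10) (Nat.mod_lt _ (by omega))
        omega

lemma pvValAux (n : ℕ) : ∀ (a : ℕ),
    (pvNatChars n).foldl (fun a c => 10 * a + (c.toNat - 48)) a
      = a * 10 ^ (pvNatChars n).length + n := by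
  induction n using Nat.strong_induction_on with
  | _ n ih =>
    intro a
    rw [pvNatChars]
    split
    · next h =>
      simp only [List.foldl_cons, List.foldl_nil, List.length_cons, List.length_nil]
      rw [pvDigitChar_toNat n (by omega)]
      have : (10:ℕ) ^ (0 + 1) = 10 := by norm_num
      rw [this]
      omega
    · next h =>
      rw [List.foldl_append, ih (n / 10) (Nat.div_lt_self (by omega) (by omega)) a]
      simp only [List.foldl_cons, List.foldl_nil, List.length_append, List.length_cons,
        List.length_nil]
      rw [pvDigitChar_toNat (n % 10) (by omega)]
      have h10 := Nat.div_add_mod n 10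
      rw [Nat.zero_add, pow_succ, ← Nat.mul_assoc]
      generalize a * 10 ^ (pvNatChars (n / 10)).length = C
      omega

lemma pvNatChars_inj {a b : ℕ} (h : pvNatChars a = pvNatChars b) : a = b := by
  have ha := pvValAux a 0
  have hb := pvValAux b 0
  rw [h] at ha
  omega

lemma pvToChars_ne_nil (n : Int) : PySem.Int.toChars n ≠ [] := by
  unfold PySem.Int.toChars
  split
  · simp
  · rw [pvToDigits_eq]; exact pvNatChars_ne_nil _

lemma pvToChars_no_comma (n : Int) : ',' ∉ PySem.Int.toChars n := by
  unfold PySem.Int.toChars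
  intro hmem
  have hc : (','.toNat) = 44 := rfl
  split at hmem
  · rcases List.mem_cons.mp hmem with h | h
    · exact absurd h (by decide)
    · rw [pvToDigits_eq] at h
      have := pvNatChars_digits _ _ h
      omega
  · rw [pvToDigits_eq] at hmem
    have := pvNatChars_digits _ _ hmem
    omega

lemma pvToChars_inj {a b : Int} (h : PySem.Int.toChars a = PySem.Int.toChars b) : a = b := by
  have h45 : ('-'.toNat) = 45 := rfl
  unfold PySem.Int.toChars at h
  by_cases ha : a < 0 <;> by_cases hb : b < 0 <;> simp [ha, hb, pvToDigits_eq] at h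
  · have := pvNatChars_inj h
    omega
  · have hm : '-' ∈ pvNatChars b.toNat := by rw [← h]; exact List.mem_cons_self ..
    have := pvNatChars_digits _ _ hm
    omega
  · have hm : '-' ∈ pvNatChars a.toNat := by rw [h]; exact List.mem_cons_self ..
    have := pvNatChars_digits _ _ hm
    omega
  · have := pvNatChars_inj h
    omega

-- ---------- injectivity of the list repr ----------

lemma pvSplitComma : ∀ (a b u v : List Char), ',' ∉ a → ',' ∉ b →
    a ++ ',' :: u = b ++ ',' :: v → a = b ∧ u = v := by
  intro a
  induction a with
  | nil =>
    intro b u v _ hb h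
    cases b with
    | nil => simpa using h
    | cons y ys =>
      simp at h
      exfalso
      apply hb
      rw [← h.1]
      simp
  | cons x xs ih =>
    intro b u v ha hb h
    cases b with
    | nil =>
      simp at h
      exfalso
      apply ha
      rw [h.1]
      simp
    | cons y ys =>
      simp at h
      obtain ⟨h1, h2⟩ := h
      subst h1
      have := ih ys u v (by simp at ha; tauto) (by simp at hb; tauto) h2
      simp [this]

lemma pvJoinComma_cons_ne_nil (c : List Char) (hc : c ≠ []) (l : List (List Char)) :
    pvJoinComma (c :: l) ≠ [] := by
  cases l with
  | nil => simpa [pvJoinComma]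
  | cons d ds => simp [pvJoinComma, hc]

lemma pvJoinInj : ∀ (xs ys : List Int),
    pvJoinComma (xs.map PySem.Int.toChars) = pvJoinComma (ys.map PySem.Int.toChars) → xs = ys := by
  intro xs
  induction xs with
  | nil =>
    intro ys h
    cases ys with
    | nil => rfl
    | cons y yt =>
      exact absurd h.symm (pvJoinComma_cons_ne_nil _ (pvToChars_ne_nil y) _)
  | cons x xt ih =>
    intro ys h
    cases ys with
    | nil =>
      exact absurd h (pvJoinComma_cons_ne_nil _ (pvToChars_ne_nil x) _)
    | cons y yt =>
      cases xt with
      | nil =>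
        cases yt with
        | nil =>
          simp [pvJoinComma] at h
          rw [pvToChars_inj h]
        | cons y2 yt2 =>
          simp [pvJoinComma] at h
          exfalso
          apply pvToChars_no_comma x
          rw [h]
          simp
      | cons x2 xt2 =>
        cases yt with
        | nil =>
          simp [pvJoinComma] at h
          exfalso
          apply pvToChars_no_comma y
          rw [← h]
          simp
        | cons y2 yt2 =>
          simp only [List.map, pvJoinComma] at h
          have hsp := pvSplitComma _ _ _ _ (pvToChars_no_comma x) (pvToChars_no_comma y) h
          obtain ⟨h1, h2⟩ := hsp
          have hx := pvToChars_inj h1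
          have h2' : pvJoinComma ((x2 :: xt2).map PySem.Int.toChars)
              = pvJoinComma ((y2 :: yt2).map PySem.Int.toChars) := by
            simpa using h2
          have := ih (y2 :: yt2) h2'
          rw [hx, this]

lemma pvStrList_inj {a b : List Int} (h : pvStrList a = pvStrList b) : a = b := by
  unfold pvStrList at h
  have h2 := congrArg String.toList h
  simp only [String.toList_ofList] at h2
  have h3 := (List.cons.injEq _ _ _ _).mp h2
  have h4 := List.append_cancel_right h3.2
  exact pvJoinInj _ _ h4

-- ---------- generic Set-fold lemmas ----------

lemma pvMemFoldlAdd {α β : Type} [BEq α] [LawfulBEq α] (f : β → α) (l : List β)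
    (s : PySem.Set α) (x : α) :
    x ∈ l.foldl (fun s b => PySem.Set.add s (f b)) s ↔ x ∈ s ∨ ∃ b ∈ l, x = f b := by
  induction l generalizing s with
  | nil => simp
  | cons a t ih =>
    simp only [List.foldl_cons, ih, PySem.Set.mem_add]
    constructor
    · rintro ((h | h) | ⟨b, hb, rfl⟩)
      · exact Or.inl h
      · exact Or.inr ⟨a, by simp, h⟩
      · exact Or.inr ⟨b, by simp [hb], rfl⟩
    · rintro (h | ⟨b, hb, rfl⟩)
      · exact Or.inl (Or.inl h)
      · rcases List.mem_cons.mp hb with rfl | hb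
        · exact Or.inl (Or.inr rfl)
        · exact Or.inr ⟨b, hb, rfl⟩

lemma pvNodupFoldlAdd {α β : Type} [BEq α] [LawfulBEq α] (f : β → α) (l : List β)
    (s : PySem.Set α) (h : List.Nodup s) :
    (l.foldl (fun s b => PySem.Set.add s (f b)) s).Nodup := by
  induction l generalizing s with
  | nil => exact h
  | cons a t ih => exact ih _ (PySem.Set.nodup_add _ _ h)

lemma pvFoldlAddMem {α β : Type} [BEq α] [LawfulBEq α] (x : α) (l : List β)
    (s : PySem.Set α) (h : x ∈ s) : l.foldl (fun s _ => PySem.Set.add s x) s = s := by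
  induction l with
  | nil => rfl
  | cons a t ih => simpa [List.foldl_cons, PySem.Set.add_of_mem h] using ih

-- ---------- rotations: smallest period ----------

lemma pvPeriod_ex (seq : List Int) (hn : seq ≠ []) : ∃ p, 0 < p ∧ seq.rotate p = seq :=
  ⟨seq.length, List.length_pos_of_ne_nil hn, List.rotate_length seq⟩

def pvPeriod (seq : List Int) : ℕ :=
  if h : seq = [] then 1 else Nat.find (pvPeriod_ex seq h)

lemma pvPeriod_pos (seq : List Int) : 0 < pvPeriod seq := by
  unfold pvPeriod
  split
  · omega
  · next h => exact (Nat.find_spec (pvPeriod_ex seq h)).1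

lemma pvPeriod_rot (seq : List Int) (hn : seq ≠ []) : seq.rotate (pvPeriod seq) = seq := by
  rw [pvPeriod, dif_neg hn]
  exact (Nat.find_spec (pvPeriod_ex seq hn)).2

lemma pvPeriod_min (seq : List Int) (hn : seq ≠ []) (q : ℕ) (h0 : 0 < q)
    (hq : seq.rotate q = seq) : pvPeriod seq ≤ q := by
  rw [pvPeriod, dif_neg hn]
  exact Nat.find_min' _ ⟨h0, hq⟩

lemma pvPeriod_le (seq : List Int) (hn : seq ≠ []) : pvPeriod seq ≤ seq.length :=
  pvPeriod_min seq hn _ (List.length_pos_of_ne_nil hn) (List.rotate_length seq)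

lemma pvPeriod_mul (seq : List Int) (hn : seq ≠ []) (q : ℕ) :
    seq.rotate (pvPeriod seq * q) = seq := by
  induction q with
  | zero => simp
  | succ q ih =>
    have h : pvPeriod seq * (q + 1) = pvPeriod seq * q + pvPeriod seq := by ring
    rw [h, ← List.rotate_rotate, ih, pvPeriod_rot seq hn]

lemma pvPeriod_rotmod (seq : List Int) (hn : seq ≠ []) (a : ℕ) :
    seq.rotate (a % pvPeriod seq) = seq.rotate a := by
  have h := pvPeriod_mul seq hn (a / pvPeriod seq)
  calc seq.rotate (a % pvPeriod seq)
      = (seq.rotate (pvPeriod seq * (a / pvPeriod seq))).rotate (a % pvPeriod seq) := by rw [h]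
    _ = seq.rotate (pvPeriod seq * (a / pvPeriod seq) + a % pvPeriod seq) :=
        List.rotate_rotate _ _ _
    _ = seq.rotate a := by rw [Nat.div_add_mod]

lemma pvPeriod_dvd (seq : List Int) (hn : seq ≠ []) (q : ℕ) (hq : seq.rotate q = seq) :
    pvPeriod seq ∣ q := by
  have h1 : seq.rotate (q % pvPeriod seq) = seq := by
    rw [pvPeriod_rotmod seq hn q, hq]
  by_cases h : q % pvPeriod seq = 0
  · exact Nat.dvd_of_mod_eq_zero h
  · have hmin := pvPeriod_min seq hn _ (by omega) h1
    have hlt := Nat.mod_lt q (pvPeriod_pos seq)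
    omega

lemma pvPeriod_dvd_len (seq : List Int) (hn : seq ≠ []) : pvPeriod seq ∣ seq.length :=
  pvPeriod_dvd seq hn _ (List.rotate_length seq)

lemma pvRotInj (seq : List Int) (hn : seq ≠ []) (a b : ℕ) :
    seq.rotate a = seq.rotate b ↔ a % pvPeriod seq = b % pvPeriod seq := by
  have hP := pvPeriod_pos seq
  constructor
  · intro h
    have hq := Nat.div_add_mod a (pvPeriod seq)
    have hmlt : a % pvPeriod seq < pvPeriod seq := Nat.mod_lt _ hP
    have ht : a + (pvPeriod seq - a % pvPeriod seq) = pvPeriod seq * (a / pvPeriod seq + 1) := by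
      have hr : pvPeriod seq * (a / pvPeriod seq + 1)
          = pvPeriod seq * (a / pvPeriod seq) + pvPeriod seq := by ring
      omega
    have h1 : seq.rotate (a + (pvPeriod seq - a % pvPeriod seq)) = seq := by
      rw [ht]; exact pvPeriod_mul seq hn _
    have h2 : seq.rotate (b + (pvPeriod seq - a % pvPeriod seq)) = seq := by
      rw [← List.rotate_rotate, ← h, List.rotate_rotate]; exact h1
    have e1 := (Nat.modEq_zero_iff_dvd).mpr (pvPeriod_dvd seq hn _ h1)
    have e2 := (Nat.modEq_zero_iff_dvd).mpr (pvPeriod_dvd seq hn _ h2)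
    exact Nat.ModEq.add_right_cancel' _ (e1.trans e2.symm)
  · intro h
    rw [← pvPeriod_rotmod seq hn a, ← pvPeriod_rotmod seq hn b, h]

lemma pvModCompl (P a k : ℕ) (hP : 0 < P) (h : P ∣ a + k) :
    a % P = (P - k % P) % P := by
  have e1 : a + k ≡ 0 [MOD P] := (Nat.modEq_zero_iff_dvd).mpr h
  have hk : k % P < P := Nat.mod_lt _ hP
  have e2 : (P - k % P) + k ≡ 0 [MOD P] := by
    have step : (P - k % P) + k % P = P := by omega
    calc (P - k % P) + k ≡ (P - k % P) + k % P [MOD P] :=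
          Nat.ModEq.add_left _ (Nat.mod_modEq k P).symm
      _ = P := step
      _ ≡ 0 [MOD P] := (Nat.modEq_zero_iff_dvd).mpr (dvd_refl P)
  exact Nat.ModEq.add_right_cancel' _ (e1.trans e2.symm)

-- ---------- slices as rotations ----------

lemma pvSliceNil {α : Type} (a b : Option Int) : PySem.List.slice ([] : List α) a b = [] := by
  cases h : PySem.List.slice ([] : List α) a b with
  | nil => rfl
  | cons x xs =>
    exfalso
    have hx : x ∈ PySem.List.slice ([] : List α) a b := by rw [h]; simp
    have := PySem.List.mem_of_mem_slice _ _ _ hx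
    simp at this

lemma pvShiftRight_eq (seq : List Int) (i : Int) (h1 : 1 ≤ i) :
    shiftRight seq i = seq.rotate (seq.length - i.toNat) := by
  have hkpos : 0 < i.toNat := by omega
  have hi : i = (i.toNat : Int) := by omega
  unfold shiftRight
  rw [hi]
  simp only [Int.toNat_natCast]
  rw [PySem.List.slice_from_neg_natCast seq i.toNat hkpos,
    PySem.List.slice_to_neg_natCast seq i.toNat hkpos,
    List.rotate_eq_drop_append_take (Nat.sub_le _ _)]

lemma pvRot_eq (seq : List Int) (i : Int) (h0 : 0 ≤ i) :
    pvRot seq i = seq.rotate i.toNat ∨ seq.length < i.toNat := by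
  by_cases h : i.toNat ≤ seq.length
  · left
    unfold pvRot
    rw [PySem.List.slice_from seq h0, PySem.List.slice_to seq h0,
      List.rotate_eq_drop_append_take h]
  · right; omega

-- ---------- the canonical rotation list ----------

def pvM (seq : List Int) (pn : Int) : ℕ := min (pn - 1).toNat (seq.length - 1)
def pvMp (seq : List Int) (pn : Int) : ℕ := min (pvM seq pn) (pvPeriod seq - 1)
def pvCanon (seq : List Int) (pn : Int) : List ℕ :=
  0 :: List.range' (pvPeriod seq - pvMp seq pn) (pvMp seq pn)

lemma pvCanonLt (seq : List Int) (pn : Int) :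
    ∀ r ∈ pvCanon seq pn, r < pvPeriod seq := by
  intro r hr
  have hP := pvPeriod_pos seq
  have hmp : pvMp seq pn ≤ pvPeriod seq - 1 := min_le_right _ _
  rcases List.mem_cons.mp hr with rfl | h
  · omega
  · rw [List.mem_range'_1] at h
    omega

lemma pvMemSetA (seq : List Int) (pn : Int) (x : String) :
    x ∈ pvSetA seq pn ↔ x = pvStrList seq ∨ ∃ i, 1 ≤ i ∧ i < pn ∧ x = pvStrList (shiftRight seq i) := by
  unfold pvSetA
  rw [pvMemFoldlAdd]
  constructor
  · rintro (h | ⟨i, hi, rfl⟩)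
    · rw [PySem.Set.mem_add] at h
      rcases h with h | h
      · simp [PySem.Set.empty] at h
      · exact Or.inl h
    · rw [PySem.List.mem_pyRange_one] at hi
      exact Or.inr ⟨i, hi.1, hi.2, rfl⟩
  · rintro (rfl | ⟨i, h1, h2, rfl⟩)
    · exact Or.inl ((PySem.Set.mem_add _ _ _).mpr (Or.inr rfl))
    · exact Or.inr ⟨i, PySem.List.mem_pyRange_one.mpr ⟨h1, h2⟩, rfl⟩

lemma pvMemCanon (seq : List Int) (pn : Int) (hn : seq ≠ []) (x : String) :
    x ∈ pvSetA seq pn ↔ ∃ r ∈ pvCanon seq pn, x = pvStrList (seq.rotate r) := by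
  have hP := pvPeriod_pos seq
  have hPle := pvPeriod_le seq hn
  have hPdvd := pvPeriod_dvd_len seq hn
  have hnlen := List.length_pos_of_ne_nil hn
  have hmdef : pvM seq pn = min (pn - 1).toNat (seq.length - 1) := rfl
  have hm'def : pvMp seq pn = min (pvM seq pn) (pvPeriod seq - 1) := rfl
  rw [pvMemSetA]
  constructor
  · rintro (rfl | ⟨i, h1, h2, rfl⟩)
    · exact ⟨0, List.mem_cons_self .., by rw [List.rotate_zero]⟩
    · rw [pvShiftRight_eq seq i h1]
      have hk1 : 1 ≤ i.toNat := by omega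
      by_cases hkn : seq.length ≤ i.toNat
      · have hz : seq.length - i.toNat = 0 := by omega
        rw [hz]
        exact ⟨0, List.mem_cons_self .., by rw [List.rotate_zero]⟩
      · have hkm : i.toNat ≤ pvM seq pn := by omega
        refine ⟨(seq.length - i.toNat) % pvPeriod seq, ?_, ?_⟩
        · have hdvd : pvPeriod seq ∣ (seq.length - i.toNat) + i.toNat := by
            have he : (seq.length - i.toNat) + i.toNat = seq.length := by omega
            rw [he]; exact hPdvd
          have hcompl := pvModCompl (pvPeriod seq) (seq.length - i.toNat) i.toNat hP hdvd
          by_cases hk0 : i.toNat % pvPeriod seq = 0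
          · rw [hcompl, hk0, Nat.sub_zero, Nat.mod_self]
            exact List.mem_cons_self ..
          · have hkP : i.toNat % pvPeriod seq < pvPeriod seq := Nat.mod_lt _ hP
            have hmle : i.toNat % pvPeriod seq ≤ i.toNat := Nat.mod_le _ _
            have hv : (seq.length - i.toNat) % pvPeriod seq
                = pvPeriod seq - i.toNat % pvPeriod seq := by
              rw [hcompl]; exact Nat.mod_eq_of_lt (by omega)
            rw [hv]
            refine List.mem_cons.mpr (Or.inr (List.mem_range'_1.mpr ⟨?_, ?_⟩)) <;> omega
        · exact congrArg pvStrList (pvPeriod_rotmod seq hn _).symm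
  · rintro ⟨r, hr, rfl⟩
    rcases List.mem_cons.mp hr with rfl | hr'
    · exact Or.inl (by rw [List.rotate_zero])
    · rw [List.mem_range'_1] at hr'
      have hmp : pvMp seq pn ≤ pvPeriod seq - 1 := min_le_right _ _
      have hmm : pvMp seq pn ≤ pvM seq pn := min_le_left _ _
      have hrlt : r < pvPeriod seq := by omega
      have hr1 : 1 ≤ r := by omega
      have hkm' : pvPeriod seq - r ≤ pvMp seq pn := by omega
      refine Or.inr ⟨((pvPeriod seq - r : ℕ) : Int), by omega, by omega, ?_⟩
      rw [pvShiftRight_eq seq _ (by omega)]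
      rw [Int.toNat_natCast]
      have hdvd : pvPeriod seq ∣ (seq.length - (pvPeriod seq - r)) + (pvPeriod seq - r) := by
        have he : (seq.length - (pvPeriod seq - r)) + (pvPeriod seq - r) = seq.length := by omega
        rw [he]; exact hPdvd
      have hcompl := pvModCompl (pvPeriod seq) (seq.length - (pvPeriod seq - r))
        (pvPeriod seq - r) hP hdvd
      have hkk : (pvPeriod seq - r) % pvPeriod seq = pvPeriod seq - r :=
        Nat.mod_eq_of_lt (by omega)
      have hmodr : (seq.length - (pvPeriod seq - r)) % pvPeriod seq = r := by
        rw [hcompl, hkk]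
        have he : pvPeriod seq - (pvPeriod seq - r) = r := by omega
        rw [he]
        exact Nat.mod_eq_of_lt hrlt
      refine congrArg pvStrList ?_
      rw [← pvPeriod_rotmod seq hn (seq.length - (pvPeriod seq - r)), hmodr]

lemma pvCanonNodup (seq : List Int) (pn : Int) (hn : seq ≠ []) :
    ((pvCanon seq pn).map (fun r => pvStrList (seq.rotate r))).Nodup := by
  have hP := pvPeriod_pos seq
  have hmp : pvMp seq pn ≤ pvPeriod seq - 1 := min_le_right _ _
  apply List.Nodup.map_on
  · intro r1 h1 r2 h2 heq
    have hb1 := pvCanonLt seq pn r1 h1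
    have hb2 := pvCanonLt seq pn r2 h2
    have hre := pvStrList_inj heq
    have := (pvRotInj seq hn r1 r2).mp hre
    rw [Nat.mod_eq_of_lt hb1, Nat.mod_eq_of_lt hb2] at this
    exact this
  · refine List.nodup_cons.mpr ⟨?_, List.nodup_range' 1⟩
    intro hmem
    rw [List.mem_range'_1] at hmem
    omega

lemma pvSetANodup (seq : List Int) (pn : Int) : (pvSetA seq pn).Nodup := by
  apply pvNodupFoldlAdd
  exact PySem.Set.nodup_add _ _ (by simp [PySem.Set.empty])

lemma pvLenSetA (seq : List Int) (pn : Int) (hn : seq ≠ []) :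
    (pvSetA seq pn).length = 1 + pvMp seq pn := by
  have hperm : (pvSetA seq pn).Perm ((pvCanon seq pn).map (fun r => pvStrList (seq.rotate r))) := by
    rw [List.perm_ext_iff_of_nodup (pvSetANodup seq pn) (pvCanonNodup seq pn hn)]
    intro x
    rw [pvMemCanon seq pn hn x, List.mem_map]
    constructor
    · rintro ⟨r, hr, rfl⟩; exact ⟨r, hr, rfl⟩
    · rintro ⟨r, hr, rfl⟩; exact ⟨r, hr, rfl⟩
  rw [hperm.length_eq, List.length_map]
  simp only [pvCanon, List.length_cons, List.length_range']
  omega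

-- ---------- find? on increasing lists ----------

lemma pvFindLtFalse (f : Int → Bool) : ∀ (l : List Int), l.Pairwise (· < ·) →
    ∀ x, l.find? f = some x → ∀ y ∈ l, y < x → f y = false := by
  intro l
  induction l with
  | nil => simp
  | cons a t ih =>
    intro hp x hf y hy hlt
    rw [List.find?_cons] at hf
    by_cases hfa : f a
    · simp [hfa] at hf
      subst hf
      rcases List.mem_cons.mp hy with rfl | hyt
      · omega
      · have := (List.pairwise_cons.mp hp).1 y hyt
        omega
    · simp [hfa] at hf
      rcases List.mem_cons.mp hy with rfl | hyt
      · simpa using hfa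
      · exact ih (List.pairwise_cons.mp hp).2 x hf y hyt hlt

-- ---------- B's period search ----------

lemma pvPB (seq : List Int) (hn : seq ≠ []) :
    ((PySem.List.pyRange 1 ((seq.length : Int)) 1).find? (fun i => pvRot seq i == seq)).getD
      ((seq.length : Int)) = ((pvPeriod seq : ℕ) : Int) := by
  have hP := pvPeriod_pos seq
  have hPle := pvPeriod_le seq hn
  have hnlen := List.length_pos_of_ne_nil hn
  cases hf : (PySem.List.pyRange 1 ((seq.length : Int)) 1).find? (fun i => pvRot seq i == seq) with
  | none =>
    simp only [Option.getD_none]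
    rw [List.find?_eq_none] at hf
    by_contra hne
    have hPlt : pvPeriod seq < seq.length := by
      rcases Nat.lt_or_ge (pvPeriod seq) seq.length with h | h
      · exact h
      · exfalso; apply hne; omega
    have hy := hf ((pvPeriod seq : ℕ) : Int)
      (PySem.List.mem_pyRange_one.mpr ⟨by omega, by omega⟩)
    apply hy
    simp only [beq_iff_eq]
    rcases pvRot_eq seq ((pvPeriod seq : ℕ) : Int) (by omega) with he | hgt
    · rw [he, Int.toNat_natCast]; exact pvPeriod_rot seq hn
    · rw [Int.toNat_natCast] at hgt; omega
  | some x =>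
    simp only [Option.getD_some]
    have hfx := List.find?_some hf
    have hmem := List.mem_of_find?_eq_some hf
    rw [PySem.List.mem_pyRange_one] at hmem
    rw [beq_iff_eq] at hfx
    rcases pvRot_eq seq x (by omega) with he | hgt
    · rw [he] at hfx
      have hge : pvPeriod seq ≤ x.toNat := pvPeriod_min seq hn _ (by omega) hfx
      by_contra hne
      have hlt : ((pvPeriod seq : ℕ) : Int) < x := by omega
      have hmemP : ((pvPeriod seq : ℕ) : Int) ∈ PySem.List.pyRange 1 ((seq.length : Int)) 1 :=
        PySem.List.mem_pyRange_one.mpr ⟨by omega, by omega⟩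
      have hfalse := pvFindLtFalse _ _ (PySem.List.pairwise_lt_pyRange_one _ _) x hf _ hmemP hlt
      have htrue : (pvRot seq ((pvPeriod seq : ℕ) : Int) == seq) = true := by
        simp only [beq_iff_eq]
        rcases pvRot_eq seq ((pvPeriod seq : ℕ) : Int) (by omega) with he2 | hgt2
        · rw [he2, Int.toNat_natCast]; exact pvPeriod_rot seq hn
        · rw [Int.toNat_natCast] at hgt2; omega
      rw [hfalse] at htrue
      exact Bool.false_ne_true htrue
    · omega

-- ---------- B's offset set ----------

def pvOffsets (seq : List Int) (pn : Int) : PySem.Set Int :=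
  PySem.Set.union (PySem.Set.ofList [0])
    (PySem.Set.ofList ((PySem.List.pyRange 1 (min pn ((seq.length : Int))) 1).map
      (fun i => PySem.Int.mod (((seq.length : Int)) - i) (((pvPeriod seq : ℕ) : Int)))))

lemma pvMemOffsets (seq : List Int) (pn : Int) (hn : seq ≠ []) (x : Int) :
    x ∈ pvOffsets seq pn ↔ ∃ r ∈ pvCanon seq pn, x = (r : Int) := by
  have hP := pvPeriod_pos seq
  have hPle := pvPeriod_le seq hn
  have hPdvd := pvPeriod_dvd_len seq hn
  have hnlen := List.length_pos_of_ne_nil hn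
  have hmp : pvMp seq pn ≤ pvPeriod seq - 1 := min_le_right _ _
  have hmm : pvMp seq pn ≤ pvM seq pn := min_le_left _ _
  have hmdef : pvM seq pn = min (pn - 1).toNat (seq.length - 1) := rfl
  have hm'def : pvMp seq pn = min (pvM seq pn) (pvPeriod seq - 1) := rfl
  unfold pvOffsets
  rw [PySem.Set.mem_union, PySem.Set.mem_ofList, PySem.Set.mem_ofList, List.mem_map]
  constructor
  · rintro (hx | ⟨i, hi, rfl⟩)
    · exact ⟨0, List.mem_cons_self .., by simpa using hx⟩
    · rw [PySem.List.mem_pyRange_one, lt_min_iff] at hi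
      obtain ⟨h1, h2, h3⟩ := hi
      have hk1 : 1 ≤ i.toNat := by omega
      have hkn : i.toNat < seq.length := by omega
      have hkm : i.toNat ≤ pvM seq pn := by rw [hmdef]; omega
      have hcast : ((seq.length : Int)) - i = ((seq.length - i.toNat : ℕ) : Int) := by omega
      rw [hcast, PySem.Int.mod_natCast]
      have hdvd : pvPeriod seq ∣ (seq.length - i.toNat) + i.toNat := by
        have he : (seq.length - i.toNat) + i.toNat = seq.length := by omega
        rw [he]; exact hPdvd
      have hcompl := pvModCompl (pvPeriod seq) (seq.length - i.toNat) i.toNat hP hdvd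
      by_cases hk0 : i.toNat % pvPeriod seq = 0
      · refine ⟨0, List.mem_cons_self .., ?_⟩
        rw [hcompl, hk0, Nat.sub_zero, Nat.mod_self]
      · have hkP : i.toNat % pvPeriod seq < pvPeriod seq := Nat.mod_lt _ hP
        have hmle : i.toNat % pvPeriod seq ≤ i.toNat := Nat.mod_le _ _
        have hv : (seq.length - i.toNat) % pvPeriod seq
            = pvPeriod seq - i.toNat % pvPeriod seq := by
          rw [hcompl]; exact Nat.mod_eq_of_lt (by omega)
        refine ⟨(seq.length - i.toNat) % pvPeriod seq, ?_, rfl⟩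
        rw [hv]
        refine List.mem_cons.mpr (Or.inr (List.mem_range'_1.mpr ⟨?_, ?_⟩)) <;> omega
  · rintro ⟨r, hr, rfl⟩
    rcases List.mem_cons.mp hr with rfl | hr'
    · exact Or.inl (by simp)
    · rw [List.mem_range'_1] at hr'
      have hrlt : r < pvPeriod seq := by omega
      have hr1 : 1 ≤ r := by omega
      have hkm' : pvPeriod seq - r ≤ pvMp seq pn := by omega
      have hm1 : 1 ≤ pvM seq pn := by omega
      refine Or.inr ⟨((pvPeriod seq - r : ℕ) : Int), ?_, ?_⟩
      · rw [PySem.List.mem_pyRange_one, lt_min_iff]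
        refine ⟨by omega, ?_, by omega⟩
        rw [hmdef] at hm1 hmm
        omega
      · have hcast : ((seq.length : Int)) - ((pvPeriod seq - r : ℕ) : Int)
            = ((seq.length - (pvPeriod seq - r) : ℕ) : Int) := by omega
        rw [hcast, PySem.Int.mod_natCast]
        have hdvd : pvPeriod seq ∣ (seq.length - (pvPeriod seq - r)) + (pvPeriod seq - r) := by
          have he : (seq.length - (pvPeriod seq - r)) + (pvPeriod seq - r) = seq.length := by
            omega
          rw [he]; exact hPdvd
        have hcompl := pvModCompl (pvPeriod seq) (seq.length - (pvPeriod seq - r))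
          (pvPeriod seq - r) hP hdvd
        have hkk : (pvPeriod seq - r) % pvPeriod seq = pvPeriod seq - r :=
          Nat.mod_eq_of_lt (by omega)
        rw [hcompl, hkk]
        have he : pvPeriod seq - (pvPeriod seq - r) = r := by omega
        rw [he, Nat.mod_eq_of_lt hrlt]

lemma pvCanonNodup' (seq : List Int) (pn : Int) : (pvCanon seq pn).Nodup := by
  have hP := pvPeriod_pos seq
  have hmp : pvMp seq pn ≤ pvPeriod seq - 1 := min_le_right _ _
  refine List.nodup_cons.mpr ⟨?_, List.nodup_range' 1⟩
  intro hmem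
  rw [List.mem_range'_1] at hmem
  omega

lemma pvOffsetsNodup (seq : List Int) (pn : Int) : (pvOffsets seq pn).Nodup := by
  unfold pvOffsets
  exact PySem.Set.nodup_union _ _ (PySem.Set.nodup_ofList _)

lemma pvOffsetsLen (seq : List Int) (pn : Int) (hn : seq ≠ []) :
    (pvOffsets seq pn).length = 1 + pvMp seq pn := by
  have hperm : (pvOffsets seq pn).Perm (List.map (fun (r : ℕ) => (r : Int)) (pvCanon seq pn)) := by
    rw [List.perm_ext_iff_of_nodup (pvOffsetsNodup seq pn)
      ((pvCanonNodup' seq pn).map (fun a b h => by exact_mod_cast h))]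
    intro x
    rw [pvMemOffsets seq pn hn x, List.mem_map]
    constructor
    · rintro ⟨r, hr, rfl⟩; exact ⟨r, hr, rfl⟩
    · rintro ⟨r, hr, rfl⟩; exact ⟨r, hr, rfl⟩
  rw [hperm.length_eq, List.length_map]
  simp only [pvCanon, List.length_cons, List.length_range']
  omega

-- ---------- the two tails agree ----------

theorem pvTail_eq (seq : List Int) (pn : Int) : pvTailA seq pn = pvTailB seq pn := by
  by_cases hn : seq = []
  · subst hn
    have hsr : ∀ i : Int, shiftRight ([] : List Int) i = [] := by
      intro i
      unfold shiftRight
      rw [pvSliceNil, pvSliceNil]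
      rfl
    have hs0 : PySem.Set.add (PySem.Set.empty) (pvStrList ([] : List Int))
        = [pvStrList ([] : List Int)] := by
      rw [PySem.Set.add_of_not_mem (by simp [PySem.Set.empty])]
      rfl
    have hset : pvSetA ([] : List Int) pn = [pvStrList ([] : List Int)] := by
      unfold pvSetA
      have hfun : (fun (s : PySem.Set String) (i : Int) =>
          PySem.Set.add s (pvStrList (shiftRight ([] : List Int) i)))
          = fun (s : PySem.Set String) (_ : Int) => PySem.Set.add s (pvStrList ([] : List Int)) := by
        funext s i
        rw [hsr]
      rw [hfun, hs0]
      exact pvFoldlAddMem _ _ _ (by simp)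
    have hmir : ((PySem.List.slice? ([] : List Int) none none (-1)).getD []) = [] := by
      rw [PySem.List.slice?_none_none_neg_one]
      rfl
    have hcont : PySem.Set.contains [pvStrList ([] : List Int)] (pvStrList ([] : List Int)) = true :=
      (PySem.Set.contains_iff _ _).mpr (by simp)
    simp only [pvTailA, pvTailB, hset, hmir, hcont, Bool.not_true, Bool.false_eq_true, if_false,
      PySem.Set.len, List.length_cons, List.length_nil]
    simp
  · have hnlen := List.length_pos_of_ne_nil hn
    have hP := pvPeriod_pos seq
    have hPle := pvPeriod_le seq hn
    have hne : seq.isEmpty = false := by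
      rw [List.isEmpty_eq_false_iff]
      exact hn
    have hp := pvPB seq hn
    have hlen := pvLenSetA seq pn hn
    have hofflen := pvOffsetsLen seq pn hn
    have hmir : ((PySem.List.slice? seq none none (-1)).getD []) = seq.reverse := by
      rw [PySem.List.slice?_none_none_neg_one]
      rfl
    have hAmem : pvStrList seq.reverse ∈ pvSetA seq pn
        ↔ ∃ r ∈ pvCanon seq pn, seq.rotate r = seq.reverse := by
      rw [pvMemCanon seq pn hn]
      constructor
      · rintro ⟨r, hr, heq⟩
        exact ⟨r, hr, (pvStrList_inj heq).symm⟩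
      · rintro ⟨r, hr, hrot⟩
        exact ⟨r, hr, congrArg pvStrList hrot.symm⟩
    have hB : PySem.Set.contains (pvSetA seq pn) (pvStrList seq.reverse)
        = (pvOffsets seq pn).any (fun i => pvRot seq i == seq.reverse) := by
      rcases Bool.eq_false_or_eq_true
          ((pvOffsets seq pn).any (fun i => pvRot seq i == seq.reverse)) with hb | hb
      swap
      · rw [hb, Bool.eq_false_iff]
        intro hc
        obtain ⟨r, hr, hrot⟩ := hAmem.mp ((PySem.Set.contains_iff _ _).mp hc)
        have hrP := pvCanonLt seq pn r hr
        have htrue : (pvOffsets seq pn).any (fun i => pvRot seq i == seq.reverse) = true := by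
          rw [List.any_eq_true]
          refine ⟨((r : ℕ) : Int), (pvMemOffsets seq pn hn _).mpr ⟨r, hr, rfl⟩, ?_⟩
          simp only [beq_iff_eq]
          rcases pvRot_eq seq ((r : ℕ) : Int) (by omega) with he | hgt
          · rw [he, Int.toNat_natCast]; exact hrot
          · rw [Int.toNat_natCast] at hgt; omega
        rw [hb] at htrue
        exact Bool.false_ne_true htrue
      · rw [hb]
        rw [List.any_eq_true] at hb
        obtain ⟨i, hi, hfi⟩ := hb
        obtain ⟨r, hr, rfl⟩ := (pvMemOffsets seq pn hn i).mp hi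
        have hrP := pvCanonLt seq pn r hr
        rw [beq_iff_eq] at hfi
        refine (PySem.Set.contains_iff _ _).mpr (hAmem.mpr ⟨r, hr, ?_⟩)
        rcases pvRot_eq seq ((r : ℕ) : Int) (by omega) with he | hgt
        · rw [he, Int.toNat_natCast] at hfi; exact hfi
        · rw [Int.toNat_natCast] at hgt; omega
    have hfold : PySem.Set.union (PySem.Set.ofList [0])
        (PySem.Set.ofList ((PySem.List.pyRange 1 (min pn ((seq.length : Int))) 1).map
          (fun i => PySem.Int.mod (((seq.length : Int)) - i) (((pvPeriod seq : ℕ) : Int)))))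
        = pvOffsets seq pn := rfl
    simp only [pvTailA, pvTailB, hne, Bool.false_eq_true, if_false, hmir, hp, hfold, hB,
      PySem.Set.len, hlen, hofflen]
    cases hbv : (pvOffsets seq pn).any (fun i => pvRot seq i == seq.reverse) with
    | true => simp
    | false =>
      simp only [Bool.not_false, if_true, Bool.false_eq_true, if_false]
      ring

-- ---------- phase 1 ----------

lemma pvStepEq (d : PySem.Dict Int Int) (x : Int) :
    (if d.contains x then d.modify x 0 (· + 1) else d.insert x 2)
      = d.insert x (d.getD x 1 + 1) := by
  by_cases h : d.contains x
  · simp only [h, if_true]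
    unfold PySem.Dict.modify
    congr 1
    unfold PySem.Dict.getD PySem.Dict.get? PySem.Dict.contains at *
    rw [List.any_eq_true] at h
    obtain ⟨p, hp, hpx⟩ := h
    have hsome : (List.find? (fun p => p.1 == x) d.items).isSome := by
      rw [List.find?_isSome]
      exact ⟨p, hp, hpx⟩
    cases hfind : List.find? (fun p => p.1 == x) d.items with
    | none => rw [hfind] at hsome; simp at hsome
    | some q => simp
  · simp only [h]
    unfold PySem.Dict.getD PySem.Dict.get? PySem.Dict.contains at *
    have hnone : List.find? (fun p => p.1 == x) d.items = none := by
      rw [List.find?_eq_none]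
      intro p hp
      rw [Bool.not_eq_true]
      by_contra hc
      apply h
      rw [List.any_eq_true]
      exact ⟨p, hp, by simpa using hc⟩
    simp [hnone]

lemma pvSeq_eq (rT : List (List Int)) : pvDegreeSequenceA rT = pvDegreeSequenceB rT := by
  unfold pvDegreeSequenceA pvDegreeSequenceB
  have hstep : (fun (d : PySem.Dict Int Int) (node : Int) =>
      if d.contains node then d.modify node 0 (· + 1) else d.insert node 2)
      = (fun (d : PySem.Dict Int Int) (node : Int) => d.insert node (d.getD node 1 + 1)) := by
    funext d node
    exact pvStepEq d node
  rw [hstep]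
  rw [PySem.List.foldl_append_singleton_eq_map]
  simp

-- ===== VERDICT (by name: the statement is the Claim_ definition above) =====
theorem getIsomorphicCount_spec : Claim_equal_getIsomorphicCount := by
  intro rT pn _
  unfold Spec_getIsomorphicCount getIsomorphicCount getIsomorphicCount_alt
  rw [pvSeq_eq, pvTail_eq]
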